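/- GENERATED by mk_final_copies.py from the proof of the farm's unit `start_decoder.C7a` (farm:start_decoder.C7a.1: Proof.lean) as the
   re-elaboration sweep compiled it — do not edit. -/
import Asan.CheckWalk
import Vorbis.Spec.Units.start_decoder_C7a
import Vorbis.Spec.Worked.start_decoder_C7a_Lemmas

open X86 X86.User Asan Vorbis Vorbis.Spec Vorbis.Spec.StartDecoder

set_option maxRecDepth 4000
set_option maxHeartbeats 1000000

namespace Vorbis.Spec.start_decoder_C7a

/-- **Segment C7a of `start_decoder`** (0x1146d2 – 0x1146ef): the two walks of Lemmas.lean glued at `cut115` (0x1146ed, the return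
address of the call of compute_codewords): `c7a_first` (the check of `c->entries`, the call with its precondition from `Built`,
`Built` and `Frame` carried through the callee's footprint) and `c7a_test` (`test eax, eax ; je`: `AtC8` with VAL, or `AtC7F`). -/
theorem segC7a_glue {Lay : Layout} (hLay : Lay.hi = 0x1000000) {μ : Microarch} (hμ : UserX.MicroOK μ) {u₀ : State}
    (hcode : HasCodeNat Lay u₀ Vorbis.L.start_decoder.entry Vorbis.Code.code_start_decoder.nat Vorbis.L.start_decoder.size)
    (h4 : Asan.SmallCheck Lay μ Vorbis.WayInv (Vorbis.CodeOK u₀) [.rax, .rcx, .rdx] 4 Vorbis.L.__asan_load4_noabort.entry)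
    (hcc : ∀ (others : List Obj) (frames : List (Nat × FrameLayout)) (Blk : Block → Prop),
      Calls Lay μ Vorbis.WayInv (Vorbis.conv u₀) Vorbis.L.compute_codewords.entry
        (Vorbis.Spec.compute_codewords.spec others frames Blk)) :
    SegC7a Lay μ u₀ := by
  intro g i v hat
  refine (c7a_first Lay hLay μ hμ u₀ hcode h4 hcc g i v hat).trans ?_
  intro w hw
  obtain ⟨A, lengths, values, A2, A3, Ai, Aw, hafter⟩ := hw
  refine (c7a_test Lay hLay μ hμ u₀ hcode g i A2 A3 Ai Aw A lengths values w hafter).mono ?_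
  intro x hx
  rcases hx with h8 | hF
  · exact Or.inl h8
  · exact Or.inr ⟨A, lengths, values, A2, A3, Ai, Aw, hF⟩

end Vorbis.Spec.start_decoder_C7a

theorem Vorbis.Spec.Worked.start_decoder_C7a_ok : Vorbis.Spec.start_decoder_C7a.Statement := by
  intro Lay hLay μ hμ u₀ hcode h4 hcc
  exact Vorbis.Spec.start_decoder_C7a.segC7a_glue hLay hμ hcode h4 hcc
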